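-- pv_equiv track=rewrite | github.com/kstecrypto-hub/n8n-to-python | src/bee_ingestion/retrieval_eval.py | _match_expected_documents
-- ===== SOURCE A (Python) =====
-- def _match_expected_documents(expected: list[str], filenames: list[str]) -> list[str]:
--     expected_lower = [item.lower() for item in expected]
--     hits: list[str] = []
--     for filename in filenames:
--         normalized = filename.lower()
--         if any(item in normalized for item in expected_lower):
--             hits.append(filename)
--     return hits
-- ===== SOURCE B (Python) =====
-- def _match_expected_documents(expected: list[str], filenames: list[str]) -> list[str]:
--     lowered = [f.lower() for f in filenames]
--     matched: set[int] = set()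
--     remaining = list(enumerate(lowered))
--     for pat in expected:
--         p = pat.lower()
--         new_remaining = []
--         for i, lf in remaining:
--             if p in lf:
--                 matched.add(i)
--             else:
--                 new_remaining.append((i, lf))
--         remaining = new_remaining
--     return [f for i, f in enumerate(filenames) if i in matched]
-- ===== Notes on version B (the rewrite author's own statement) =====
-- stated objective: alternative
-- what changed: Pattern-major worklist: filenames are lowercased once, then each expected pattern scans only the still-unmatched (index, lowered) pairs, moving hits into an index set; the result is read off the index set in original order, instead of A's filename-major loop with an inner any() over all patterns.
import Mathlib
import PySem

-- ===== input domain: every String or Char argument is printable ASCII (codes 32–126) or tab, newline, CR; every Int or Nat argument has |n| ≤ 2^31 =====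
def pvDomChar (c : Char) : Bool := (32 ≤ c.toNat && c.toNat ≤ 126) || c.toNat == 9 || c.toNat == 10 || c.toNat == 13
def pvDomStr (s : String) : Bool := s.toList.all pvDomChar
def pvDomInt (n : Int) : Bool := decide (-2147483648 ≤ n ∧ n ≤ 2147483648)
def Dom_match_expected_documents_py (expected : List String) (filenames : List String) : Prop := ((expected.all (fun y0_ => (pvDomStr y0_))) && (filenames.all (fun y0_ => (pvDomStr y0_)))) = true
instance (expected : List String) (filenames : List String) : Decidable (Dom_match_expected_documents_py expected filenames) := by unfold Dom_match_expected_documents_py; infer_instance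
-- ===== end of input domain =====

-- B replaces A's filename-major loop (inner any() over patterns) by a pattern-major worklist scan
-- over still-unmatched (index, lowered) pairs, reading the matched-index set off in original order (alternative traversal).


-- ===== PORT A =====
def match_expected_documents_py (expected : List String) (filenames : List String) : List String :=
  let expected_lower := expected.map (fun item => PySem.Str.lower item)
  filenames.foldl (fun hits filename =>
    let normalized := PySem.Str.lower filename
    if expected_lower.any (fun item => PySem.Str.isIn item normalized) then hits ++ [filename]
    else hits) []

-- ===== PORT B =====
def match_expected_documents_py_alt (expected : List String) (filenames : List String) : List String :=
  let lowered := filenames.map (fun f => PySem.Str.lower f)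
  let st : PySem.Set Int × List (Int × String) := expected.foldl (fun st pat =>
      let p := PySem.Str.lower pat
      st.2.foldl (fun st il =>
        if PySem.Str.isIn p il.2 then (PySem.Set.add st.1 il.1, st.2)
        else (st.1, st.2 ++ [il])) (st.1, [])) (PySem.Set.empty, PySem.List.enumerate lowered)
  ((PySem.List.enumerate filenames).filter (fun il => PySem.Set.contains st.1 il.1)).map Prod.snd

-- ===== PRECONDITION & SPEC =====
def Spec_match_expected_documents_py (expected : List String) (filenames : List String) (out : List String) : Prop := out = match_expected_documents_py_alt expected filenames
instance (expected : List String) (filenames : List String) (out : List String) : Decidable (Spec_match_expected_documents_py expected filenames out) := by unfold Spec_match_expected_documents_py; infer_instance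

-- ===== CLAIM (what is proved, stated in full; the proofs are below) =====
def Claim_equal_match_expected_documents_py : Prop := ∀ (expected : List String) (filenames : List String), Dom_match_expected_documents_py expected filenames → Spec_match_expected_documents_py expected filenames (match_expected_documents_py expected filenames)

-- ===== LEMMAS AND PROOFS =====

/-- Membership in an `enumerate` list: index = start + position, value = element there. -/
theorem pv_mem_enumerate {α : Type} (l : List α) (k : Int) (p : Int × α) :
    p ∈ PySem.List.enumerate l k ↔ ∃ n : Nat, l[n]? = some p.2 ∧ p.1 = k + n := by
  induction l generalizing k with
  | nil => simp [PySem.List.enumerate]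
  | cons a t ih =>
    simp only [PySem.List.enumerate, List.mem_cons, ih]
    constructor
    · rintro (rfl | ⟨n, hn, hp⟩)
      · exact ⟨0, by simp⟩
      · exact ⟨n + 1, by simpa using hn, by push_cast; omega⟩
    · rintro ⟨n, hn, hp⟩
      cases n with
      | zero =>
        left
        simp at hn hp
        obtain ⟨i, x⟩ := p
        simp_all
      | succ m =>
        right
        exact ⟨m, by simpa using hn, by push_cast at hp ⊢; omega⟩

/-- One pass of B's worklist loop, decomposed into its two components. -/
theorem pv_inner_eq (p : String) (r : List (Int × String)) (m : PySem.Set Int) (nr : List (Int × String)) :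
    r.foldl (fun st il =>
        if PySem.Str.isIn p il.2 then (PySem.Set.add st.1 il.1, st.2)
        else (st.1, st.2 ++ [il])) (m, nr) =
      (r.foldl (fun m il => if PySem.Str.isIn p il.2 then PySem.Set.add m il.1 else m) m,
       nr ++ r.filter (fun il => !PySem.Str.isIn p il.2)) := by
  induction r generalizing m nr with
  | nil => simp
  | cons a t ih =>
    simp only [List.foldl_cons, List.filter_cons]
    by_cases h : PySem.Str.isIn p a.2 = true
    · rw [if_pos h, ih]
      have h' : PySem.Chars.isIn p.toList a.2.toList = true := h
      simp [h']
    · rw [if_neg h, ih]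
      have h' : PySem.Chars.isIn p.toList a.2.toList = false := by simpa using h
      simp [h']

/-- Membership in the matched-set component of one pass. -/
theorem pv_mem_inner (p : String) (l : List (Int × String)) (m : PySem.Set Int) (i : Int) :
    i ∈ l.foldl (fun m il => if PySem.Str.isIn p il.2 then PySem.Set.add m il.1 else m) m ↔
      i ∈ m ∨ ∃ il ∈ l, PySem.Str.isIn p il.2 = true ∧ il.1 = i := by
  induction l generalizing m with
  | nil => simp
  | cons a t ih =>
    simp only [List.foldl_cons, ih, List.mem_cons]
    split_ifs with h
    · rw [PySem.Set.mem_add]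
      constructor
      · rintro ((hm | rfl) | hex)
        · exact .inl hm
        · exact .inr ⟨a, .inl rfl, h, rfl⟩
        · obtain ⟨il, hil, hq, hi⟩ := hex; exact .inr ⟨il, .inr hil, hq, hi⟩
      · rintro (hm | ⟨il, (rfl | hil), hq, hi⟩)
        · exact .inl (.inl hm)
        · exact .inl (.inr hi.symm)
        · exact .inr ⟨il, hil, hq, hi⟩
    · constructor
      · rintro (hm | ⟨il, hil, hq, hi⟩)
        · exact .inl hm
        · exact .inr ⟨il, .inr hil, hq, hi⟩
      · rintro (hm | ⟨il, (rfl | hil), hq, hi⟩)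
        · exact .inl hm
        · exact absurd hq (by simpa using h)
        · exact .inr ⟨il, hil, hq, hi⟩

/-- Membership in the final `matched` set of B's pattern-major worklist fold. -/
theorem pv_mem_matched (expected : List String) (m : PySem.Set Int) (r : List (Int × String)) (i : Int) :
    i ∈ (expected.foldl (fun st pat =>
        st.2.foldl (fun st il =>
          if PySem.Str.isIn (PySem.Str.lower pat) il.2 then (PySem.Set.add st.1 il.1, st.2)
          else (st.1, st.2 ++ [il])) (st.1, ([] : List (Int × String)))) (m, r)).1 ↔
      i ∈ m ∨ ∃ il ∈ r, (∃ pat ∈ expected, PySem.Str.isIn (PySem.Str.lower pat) il.2 = true) ∧ il.1 = i := by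
  induction expected generalizing m r with
  | nil => simp
  | cons e t ih =>
    simp only [List.foldl_cons]
    rw [pv_inner_eq, List.nil_append, ih, pv_mem_inner]
    simp only [List.mem_cons, List.mem_filter]
    constructor
    · rintro ((hm | ⟨il, hil, hq, hi⟩) | ⟨il, ⟨hil, hne⟩, ⟨pat, hpat, hq⟩, hi⟩)
      · exact .inl hm
      · exact .inr ⟨il, hil, ⟨e, .inl rfl, hq⟩, hi⟩
      · exact .inr ⟨il, hil, ⟨pat, .inr hpat, hq⟩, hi⟩
    · rintro (hm | ⟨il, hil, ⟨pat, (rfl | hpat), hq⟩, hi⟩)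
      · exact .inl (.inl hm)
      · exact .inl (.inr ⟨il, hil, hq, hi⟩)
      · by_cases he : PySem.Str.isIn (PySem.Str.lower e) il.2
        · exact .inl (.inr ⟨il, hil, he, hi⟩)
        · exact .inr ⟨il, ⟨hil, by simpa using he⟩, ⟨pat, hpat, hq⟩, hi⟩

/-- The filter-map over `enumerate` collapses to a plain filter when the index
    predicate agrees pointwise with a predicate on the element. -/
theorem pv_filter_enumerate {α : Type} (l : List α) (k : Int) (C : Int → Bool) (q : α → Bool)
    (H : ∀ il ∈ PySem.List.enumerate l k, C il.1 = q il.2) :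
    ((PySem.List.enumerate l k).filter (fun il => C il.1)).map Prod.snd = l.filter q := by
  induction l generalizing k with
  | nil => simp [PySem.List.enumerate]
  | cons a t ih =>
    have ha : C k = q a := H (k, a) (by simp [PySem.List.enumerate])
    have ht := ih (k + 1) (fun il hil => H il (by simp [PySem.List.enumerate, hil]))
    simp only [PySem.List.enumerate, List.filter_cons]
    by_cases hq : q a
    · simp [ha, hq, ht]
    · simp [ha, hq, ht]

-- ===== VERDICT (by name: the statement is the Claim_ definition above) =====
theorem match_expected_documents_py_spec : Claim_equal_match_expected_documents_py := by
  intro expected filenames _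
  show _ = _
  unfold match_expected_documents_py match_expected_documents_py_alt
  simp only []
  rw [PySem.List.foldl_append_if]
  rw [pv_filter_enumerate (q := fun filename =>
      (expected.map (fun item => PySem.Str.lower item)).any
        (fun item => PySem.Str.isIn item (PySem.Str.lower filename)))]
  · simp
  · intro il hil
    rw [pv_mem_enumerate] at hil
    obtain ⟨n, hn, hk⟩ := hil
    rw [Bool.eq_iff_iff, PySem.Set.contains_iff, pv_mem_matched]
    simp only [List.any_map, List.any_eq_true]
    constructor
    · rintro (h | ⟨jl, hjl, ⟨pat, hpat, hq⟩, hj⟩)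
      · simp [PySem.Set.empty] at h
      · rw [pv_mem_enumerate] at hjl
        obtain ⟨n', hn', hk'⟩ := hjl
        have : n' = n := by omega
        subst this
        rw [List.getElem?_map, hn] at hn'
        simp only [Option.map_some, Option.some.injEq] at hn'
        exact ⟨pat, hpat, by rw [← hn'] at hq; simpa using hq⟩
    · rintro ⟨pat, hpat, hq⟩
      refine .inr ⟨(il.1, PySem.Str.lower il.2), ?_, ⟨pat, hpat, by simpa using hq⟩, rfl⟩
      rw [pv_mem_enumerate]
      exact ⟨n, by simp [hn], hk⟩
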